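-- pv_equiv track=rewrite | github.com/the-astronot/the_high_ground | HackRPI.py | BFSNodeNode
-- ===== SOURCE A (Python) =====
-- def BFSNodeNode(G, s):
--     n = len(G)
--     pred = [ -1 for i in range(n)]
--     order = [ 0 for i in range(n)]
--     mark = [0 for i in range(n)]
--     Star = [s]
--     pred[s] = s
--     order[s] = 1
--     mark[s] = 1
--     k = 2
--
--     while len(Star) > 0:
--         i = Star.pop(0)
--         for j in range(n):
--             if G[i][j] == 1:
--                 if mark[j] == 0:
--                     pred[j] = i
--                     order[j] = k
--                     k+= 1
--                     mark[j] = 1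
--                     Star.append(j)
--
--     return pred, order, Star
-- ===== SOURCE B (Python) =====
-- def BFSNodeNode(G, s):
--     n = len(G)
--     pred = [-1] * n
--     order = [0] * n
--     seen = [0] * n
--     pred[s] = s
--     order[s] = 1
--     seen[s] = 1
--     k = 2
--     level = [s]
--     while level:
--         # column-major discovery: bucket each unseen vertex by the position of
--         # its FIRST neighbour inside the current level
--         buckets = [[] for _ in level]
--         for j in range(n):
--             if seen[j] == 0:
--                 for p, i in enumerate(level):
--                     if G[i][j] == 1:
--                         buckets[p].append(j)
--                         break
--         nxt = []
--         for i, bucket in zip(level, buckets):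
--             for j in bucket:
--                 pred[j] = i
--                 order[j] = k
--                 k += 1
--                 seen[j] = 1
--                 nxt.append(j)
--         level = nxt
--     return pred, order, []
-- ===== Notes on version B (the rewrite author's own statement) =====
-- stated objective: alternative
-- what changed: Replaces A's FIFO-queue BFS (row-major neighbour scan with incremental marking) by a column-major first-parent search: per level each unseen vertex finds its first neighbour inside the level and is bucketed by that parent's position, then the buckets are flushed in order; no queue and no marking during discovery.
-- outside the precondition, e.g. on BFSNodeNode([[0, 0], [1]], 0): A returns ([0, -1], [1, 0], []), B returns ([0, -1], [1, 0], [])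
import Mathlib
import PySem

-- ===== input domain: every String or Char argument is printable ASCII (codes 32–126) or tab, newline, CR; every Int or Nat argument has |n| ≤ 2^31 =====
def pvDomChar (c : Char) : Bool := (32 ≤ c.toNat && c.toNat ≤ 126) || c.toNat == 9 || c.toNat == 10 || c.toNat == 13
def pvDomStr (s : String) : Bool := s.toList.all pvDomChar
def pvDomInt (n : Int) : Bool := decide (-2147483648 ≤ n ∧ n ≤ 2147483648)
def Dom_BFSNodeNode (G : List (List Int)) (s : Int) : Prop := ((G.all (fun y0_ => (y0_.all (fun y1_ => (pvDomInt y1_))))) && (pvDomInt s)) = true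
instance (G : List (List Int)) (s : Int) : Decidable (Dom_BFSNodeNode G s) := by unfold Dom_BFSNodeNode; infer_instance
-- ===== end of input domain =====

-- B replaces A's FIFO BFS by a column-major first-parent bucket scan per level; neither mutates its arguments.

-- ===== PORT A =====
-- state (pred, order, mark, k)
abbrev BSt : Type := List Int × List Int × List Int × Int

-- A's inner 'for j in range(n)': j is a nonnegative in-range index, so mark[j] is List.getD and
-- the three list assignments are List.set; G[i] may be negative (Python wraparound) → pyGetD.
def scanRowA (G : List (List Int)) (n : Nat) (i : Int) (a : BSt × List Int) : BSt × List Int :=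
  (List.range n).foldl (fun (a : BSt × List Int) (j : Nat) =>
    if PySem.List.pyGetD (PySem.List.pyGetD G i []) (j : Int) 0 = 1 ∧ a.1.2.2.1.getD j 0 = 0 then
      ((a.1.1.set j i, a.1.2.1.set j a.1.2.2.2, a.1.2.2.1.set j 1, a.1.2.2.2 + 1), a.2 ++ [(j : Int)])
    else a) a

-- A's 'while len(Star) > 0': pop(0) = head, discoveries appended behind the rest of the queue.
-- fuel n+1 only makes the recursion structural: each append marks one of the n cells, so the
-- loop pops at most n+1 nodes and the 0-fuel branch is never reached.
def loopA (G : List (List Int)) (n : Nat) : Nat → List Int → BSt → BSt × List Int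
  | _, [], st => (st, [])
  | 0, Star, st => (st, Star)
  | fuel + 1, i :: rest, st =>
    let a := scanRowA G n i (st, rest)
    loopA G n fuel a.2 a.1

def BFSNodeNode (G : List (List Int)) (s : Int) : List Int × List Int × List Int :=
  let n := G.length
  let pred := PySem.List.pySetD (List.replicate n (-1 : Int)) s s
  let order := PySem.List.pySetD (List.replicate n (0 : Int)) s 1
  let mark := PySem.List.pySetD (List.replicate n (0 : Int)) s 1
  let r := loopA G n (n + 1) [s] (pred, order, mark, 2)
  (r.1.1, r.1.2.1, r.2)

-- ===== PORT B =====
-- B's inner 'for p, i in enumerate(level): if G[i][j] == 1: buckets[p].append(j); break'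
def pvPlace (G : List (List Int)) (j : Nat) : List Int → Nat → List (List Nat) → List (List Nat)
  | [], _, B => B
  | i :: rest, p, B =>
    if PySem.List.pyGetD (PySem.List.pyGetD G i []) (j : Int) 0 = 1 then
      B.set p (B.getD p [] ++ [j])
    else pvPlace G j rest (p + 1) B

-- B's 'buckets = [[] for _ in level]' then 'for j in range(n): if seen[j] == 0: …'
def pvBuckets (G : List (List Int)) (n : Nat) (seen : List Int) (level : List Int) : List (List Nat) :=
  (List.range n).foldl
    (fun B j => if seen.getD j 0 = 0 then pvPlace G j level 0 B else B)
    (level.map (fun _ => ([] : List Nat)))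

-- B's flush: 'for i, bucket in zip(level, buckets): for j in bucket: …' building nxt
def levelStepB (G : List (List Int)) (n : Nat) (level : List Int) (st : BSt) : BSt × List Int :=
  (level.zip (pvBuckets G n st.2.2.1 level)).foldl
    (fun a ib => ib.2.foldl (fun (a : BSt × List Int) (j : Nat) =>
        ((a.1.1.set j ib.1, a.1.2.1.set j a.1.2.2.2, a.1.2.2.1.set j 1, a.1.2.2.2 + 1),
         a.2 ++ [(j : Int)])) a)
    (st, [])

-- B's 'while level': fuel n+1 bounds the rounds (each nonempty next level marks a fresh cell)
def loopBP (G : List (List Int)) (n : Nat) : Nat → List Int → BSt → BSt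
  | _, [], st => st
  | 0, _, st => st
  | fuel + 1, f, st =>
    let a := levelStepB G n f st
    loopBP G n fuel a.2 a.1

def BFSNodeNode_alt (G : List (List Int)) (s : Int) : List Int × List Int × List Int :=
  let n := G.length
  let pred := PySem.List.pySetD (List.replicate n (-1 : Int)) s s
  let order := PySem.List.pySetD (List.replicate n (0 : Int)) s 1
  let seen := PySem.List.pySetD (List.replicate n (0 : Int)) s 1
  let r := loopBP G n (n + 1) [s] (pred, order, seen, 2)
  (r.1, r.2.1, ([] : List Int))

-- ===== PRECONDITION & SPEC =====
-- A raises IndexError when s is out of range (pred[s]) or when a visited node's row is shorter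
-- than n (G[i][j]); Pre_ asks all rows to have length ≥ n — the natural adjacency-matrix shape —
-- which also excludes graphs whose only short rows are unreachable, where A returns normally.
def Pre_BFSNodeNode (G : List (List Int)) (s : Int) : Prop :=
  (-(G.length : Int) ≤ s ∧ s < G.length) ∧ ∀ row ∈ G, G.length ≤ row.length
instance (G : List (List Int)) (s : Int) : Decidable (Pre_BFSNodeNode G s) := by
  unfold Pre_BFSNodeNode; infer_instance
def pvWitness_BFSNodeNode : List (List Int) × Int := ([[0, 1], [1, 0]], 0)

def Spec_BFSNodeNode (G : List (List Int)) (s : Int) (out : List Int × List Int × List Int) : Prop := out = BFSNodeNode_alt G s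
instance (G : List (List Int)) (s : Int) (out : List Int × List Int × List Int) : Decidable (Spec_BFSNodeNode G s out) := by unfold Spec_BFSNodeNode; infer_instance

-- ===== CLAIM (what is proved, stated in full; the proofs are below) =====
def Claim_equal_BFSNodeNode : Prop := ∀ (G : List (List Int)) (s : Int), Dom_BFSNodeNode G s → Pre_BFSNodeNode G s → Spec_BFSNodeNode G s (BFSNodeNode G s)

-- ===== LEMMAS AND PROOFS =====

-- ---- proof-only helpers ----
-- row-major level-synchronous reorganisation of A's queue loop (intermediate form)
def levelRow (G : List (List Int)) (n : Nat) (frontier : List Int) (st : BSt) : BSt × List Int :=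
  frontier.foldl (fun a i => scanRowA G n i a) (st, [])

def loopRow (G : List (List Int)) (n : Nat) : Nat → List Int → BSt → BSt
  | _, [], st => st
  | 0, _, st => st
  | fuel + 1, f, st =>
    let a := levelRow G n f st
    loopRow G n fuel a.2 a.1

def pvEdge (G : List (List Int)) (i : Int) (j : Nat) : Bool :=
  PySem.List.pyGetD (PySem.List.pyGetD G i []) (j : Int) 0 == 1

def pvProc (st : BSt) (i : Int) (j : Nat) : BSt :=
  (st.1.set j i, st.2.1.set j st.2.2.2, st.2.2.1.set j 1, st.2.2.2 + 1)

def pvPS (st : BSt) (l : List (Int × Nat)) : BSt :=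
  l.foldl (fun st x => pvProc st x.1 x.2) st

def pvRow (G : List (List Int)) (n : Nat) (i : Int) (mark : List Int) : List Nat :=
  (List.range n).filter (fun j => pvEdge G i j && (mark.getD j 0 == 0))

def pvMarkL (mark : List Int) (l : List Nat) : List Int :=
  l.foldl (fun m j => m.set j 1) mark

def pvSeq (G : List (List Int)) (n : Nat) : List Int → List Int → List (Int × Nat)
  | [], _ => []
  | i :: f, mark =>
    (pvRow G n i mark).map (fun j => (i, j)) ++
      pvSeq G n f (pvMarkL mark (pvRow G n i mark))

def pvFirst (G : List (List Int)) (j : Nat) : List Int → Nat → Option Nat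
  | [], _ => none
  | i :: f, p => if pvEdge G i j then some p else pvFirst G j f (p + 1)

-- ---- generic accumulator threading ----
-- a fold whose step only appends to the accumulator list factors over the initial accumulator
lemma foldl_acc_append {α : Type} (f : (BSt × List Int) → α → (BSt × List Int))
    (hf : ∀ st acc x, f (st, acc) x = ((f (st, []) x).1, acc ++ (f (st, []) x).2)) :
    ∀ (l : List α) (st : BSt) (acc : List Int),
      List.foldl f (st, acc) l = ((List.foldl f (st, []) l).1, acc ++ (List.foldl f (st, []) l).2) := by
  intro l
  induction l with
  | nil => intro st acc; simp
  | cons x l ih =>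
    intro st acc
    simp only [List.foldl_cons]
    rw [hf st acc x, hf st [] x, List.nil_append]
    rcases h : f (st, []) x with ⟨st1, a1⟩
    rw [ih st1 (acc ++ a1), ih st1 a1]
    simp [List.append_assoc]

lemma scanRowA_acc (G : List (List Int)) (n : Nat) (i : Int) (st : BSt) (acc : List Int) :
    scanRowA G n i (st, acc) = ((scanRowA G n i (st, [])).1, acc ++ (scanRowA G n i (st, [])).2) := by
  unfold scanRowA
  apply foldl_acc_append
  intro st acc x
  by_cases h : PySem.List.pyGetD (PySem.List.pyGetD G i []) (x : Int) 0 = 1 ∧ st.2.2.1.getD x 0 = 0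
  · simp only [if_pos h, List.nil_append]
  · simp only [if_neg h, List.append_nil]

lemma levelRow_acc (G : List (List Int)) (n : Nat) (f : List Int) (st : BSt) (acc : List Int) :
    List.foldl (fun a i => scanRowA G n i a) (st, acc) f
      = ((levelRow G n f st).1, acc ++ (levelRow G n f st).2) := by
  unfold levelRow
  apply foldl_acc_append
  intro st acc x
  exact scanRowA_acc G n x st acc

lemma levelRow_cons (G : List (List Int)) (n : Nat) (i : Int) (f : List Int) (st : BSt) :
    levelRow G n (i :: f) st
      = ((levelRow G n f (scanRowA G n i (st, [])).1).1,
         (scanRowA G n i (st, [])).2 ++ (levelRow G n f (scanRowA G n i (st, [])).1).2) := by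
  show List.foldl _ (scanRowA G n i (st, [])) f = _
  rcases h : scanRowA G n i (st, []) with ⟨st1, a1⟩
  exact levelRow_acc G n f st1 a1

-- ---- A's queue processes a whole level before anything discovered behind it ----
lemma loopA_level (G : List (List Int)) (n : Nat) :
    ∀ (f q : List Int) (fuel : Nat) (st : BSt),
      loopA G n (f.length + fuel) (f ++ q) st
        = loopA G n fuel (q ++ (levelRow G n f st).2) (levelRow G n f st).1 := by
  intro f
  induction f with
  | nil =>
    intro q fuel st
    simp [levelRow]
  | cons i f ih =>
    intro q fuel st
    have hlen : (i :: f).length + fuel = (f.length + fuel) + 1 := by simp; omega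
    rw [hlen]
    show loopA G n (f.length + fuel) (scanRowA G n i (st, f ++ q)).2 (scanRowA G n i (st, f ++ q)).1 = _
    rw [scanRowA_acc G n i st (f ++ q)]
    rcases hs : scanRowA G n i (st, []) with ⟨st1, a1⟩
    simp only []
    rw [List.append_assoc, ih (q ++ a1) fuel st1, levelRow_cons, hs]
    simp [List.append_assoc]

lemma count_zero_set (mark : List Int) (j : Nat) (hj : j < mark.length) (h0 : mark.getD j 0 = 0) :
    (mark.set j 1).count 0 + 1 = mark.count 0 := by
  induction mark generalizing j with
  | nil => simp at hj
  | cons m mark ih =>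
    cases j with
    | zero =>
      simp only [List.getD, List.getElem?_cons_zero, Option.getD_some] at h0
      simp [List.set, h0]
    | succ j =>
      simp only [List.length_cons, Nat.succ_lt_succ_iff] at hj
      have h0' : mark.getD j 0 = 0 := by simpa [List.getD] using h0
      have := ih j hj h0'
      simp [List.set, List.count_cons]
      omega

-- the inner row scan preserves mark-length and turns each appended node's 0-mark into a 1
lemma scanRowA_mark (G : List (List Int)) (n : Nat) (i : Int) :
    ∀ (l : List Nat), (∀ j ∈ l, j < n) → ∀ (st : BSt) (acc : List Int),
      st.2.2.1.length = n →
      (List.foldl (fun (a : BSt × List Int) (j : Nat) =>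
          if PySem.List.pyGetD (PySem.List.pyGetD G i []) (j : Int) 0 = 1 ∧ a.1.2.2.1.getD j 0 = 0 then
            ((a.1.1.set j i, a.1.2.1.set j a.1.2.2.2, a.1.2.2.1.set j 1, a.1.2.2.2 + 1), a.2 ++ [(j : Int)])
          else a) (st, acc) l).1.2.2.1.length = n ∧
      (List.foldl (fun (a : BSt × List Int) (j : Nat) =>
          if PySem.List.pyGetD (PySem.List.pyGetD G i []) (j : Int) 0 = 1 ∧ a.1.2.2.1.getD j 0 = 0 then
            ((a.1.1.set j i, a.1.2.1.set j a.1.2.2.2, a.1.2.2.1.set j 1, a.1.2.2.2 + 1), a.2 ++ [(j : Int)])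
          else a) (st, acc) l).1.2.2.1.count 0 +
      (List.foldl (fun (a : BSt × List Int) (j : Nat) =>
          if PySem.List.pyGetD (PySem.List.pyGetD G i []) (j : Int) 0 = 1 ∧ a.1.2.2.1.getD j 0 = 0 then
            ((a.1.1.set j i, a.1.2.1.set j a.1.2.2.2, a.1.2.2.1.set j 1, a.1.2.2.2 + 1), a.2 ++ [(j : Int)])
          else a) (st, acc) l).2.length = st.2.2.1.count 0 + acc.length := by
  intro l
  induction l with
  | nil => intro _ st acc h; exact ⟨h, rfl⟩
  | cons j l ih =>
    intro hl st acc h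
    simp only [List.foldl_cons]
    by_cases hc : PySem.List.pyGetD (PySem.List.pyGetD G i []) (j : Int) 0 = 1 ∧ st.2.2.1.getD j 0 = 0
    · rw [if_pos hc]
      have hj : j < st.2.2.1.length := h ▸ hl j (by simp)
      have hcount := count_zero_set st.2.2.1 j hj hc.2
      have hlen : (st.2.2.1.set j (1 : Int)).length = n := by simp [h]
      have := ih (fun j hj => hl j (by simp [hj]))
        (st.1.set j i, st.2.1.set j st.2.2.2, st.2.2.1.set j 1, st.2.2.2 + 1) (acc ++ [(j : Int)]) hlen
      refine ⟨this.1, ?_⟩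
      rw [this.2]
      simp
      omega
    · rw [if_neg hc]
      exact ih (fun j hj => hl j (by simp [hj])) st acc h

lemma scanRowA_mark' (G : List (List Int)) (n : Nat) (i : Int) (st : BSt) (acc : List Int)
    (h : st.2.2.1.length = n) :
    (scanRowA G n i (st, acc)).1.2.2.1.length = n ∧
    (scanRowA G n i (st, acc)).1.2.2.1.count 0 + (scanRowA G n i (st, acc)).2.length
      = st.2.2.1.count 0 + acc.length := by
  unfold scanRowA
  exact scanRowA_mark G n i (List.range n) (fun j hj => List.mem_range.mp hj) st acc h

lemma levelRow_mark (G : List (List Int)) (n : Nat) :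
    ∀ (f : List Int) (st : BSt) (acc : List Int), st.2.2.1.length = n →
      (List.foldl (fun a i => scanRowA G n i a) (st, acc) f).1.2.2.1.length = n ∧
      (List.foldl (fun a i => scanRowA G n i a) (st, acc) f).1.2.2.1.count 0 +
      (List.foldl (fun a i => scanRowA G n i a) (st, acc) f).2.length
        = st.2.2.1.count 0 + acc.length := by
  intro f
  induction f with
  | nil => intro st acc h; exact ⟨h, rfl⟩
  | cons i f ih =>
    intro st acc h
    simp only [List.foldl_cons]
    have hm := scanRowA_mark' G n i st acc h
    rcases hs : scanRowA G n i (st, acc) with ⟨st1, a1⟩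
    rw [hs] at hm
    dsimp only at hm
    have := ih st1 a1 hm.1
    refine ⟨this.1, ?_⟩
    rw [this.2]
    omega

lemma levelRow_mark' (G : List (List Int)) (n : Nat) (f : List Int) (st : BSt)
    (h : st.2.2.1.length = n) :
    (levelRow G n f st).1.2.2.1.length = n ∧
    (levelRow G n f st).1.2.2.1.count 0 + (levelRow G n f st).2.length = st.2.2.1.count 0 := by
  have := levelRow_mark G n f st [] h
  simpa [levelRow] using this

-- the central reorganisation: with enough fuel, A's FIFO loop equals the row-major
-- level-synchronous loop, and A's final queue is empty
lemma loop_main (G : List (List Int)) (n : Nat) :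
    ∀ (z : Nat) (st : BSt) (f : List Int) (fuelA fuelB : Nat),
      st.2.2.1.length = n → st.2.2.1.count 0 = z →
      f.length + z ≤ fuelA → z < fuelB →
      loopA G n fuelA f st = (loopRow G n fuelB f st, []) := by
  intro z
  induction z using Nat.strong_induction_on with
  | _ z ih =>
    intro st f fuelA fuelB hlen hz hA hB
    cases f with
    | nil =>
      cases fuelA <;> cases fuelB <;> simp [loopA, loopRow]
    | cons i f =>
      have hfl : (i :: f).length ≤ fuelA := by omega
      obtain ⟨u, hu⟩ : ∃ u, fuelA = (i :: f).length + u := ⟨fuelA - (i :: f).length, by omega⟩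
      obtain ⟨v, hv⟩ : ∃ v, fuelB = v + 1 := ⟨fuelB - 1, by omega⟩
      subst hu hv
      have hlev0 := loopA_level G n (i :: f) [] u st
      rw [List.append_nil] at hlev0
      rw [hlev0]
      have hstep : loopRow G n (v + 1) (i :: f) st
          = loopRow G n v (levelRow G n (i :: f) st).2 (levelRow G n (i :: f) st).1 := rfl
      rw [hstep, List.nil_append]
      have hm := levelRow_mark' G n (i :: f) st hlen
      rcases hlev : levelRow G n (i :: f) st with ⟨st1, nf⟩
      rw [hlev] at hm
      dsimp only at hm ⊢
      cases hnf : nf with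
      | nil =>
        subst hnf
        cases u <;> cases v <;> simp [loopA, loopRow]
      | cons x nf' =>
        subst hnf
        have hzlt : st1.2.2.1.count 0 < z := by
          have := hm.2
          simp at this
          omega
        exact ih _ hzlt st1 (x :: nf') u v hm.1 rfl (by simp at hm ⊢; omega) (by omega)

-- ---- mark-update bookkeeping ----
lemma pvMarkL_length (l : List Nat) (mark : List Int) : (pvMarkL mark l).length = mark.length := by
  induction l generalizing mark with
  | nil => rfl
  | cons x l ih => simpa [pvMarkL, List.foldl_cons] using ih (mark.set x 1)

lemma getD_set_ne (mark : List Int) (x j : Nat) (a : Int) (h : x ≠ j) :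
    (mark.set x a).getD j 0 = mark.getD j 0 := by
  simp [List.getD, List.getElem?_set_ne h]

lemma pvMarkL_getD (l : List Nat) (mark : List Int) (j : Nat) (hj : j < mark.length) :
    (pvMarkL mark l).getD j 0 = if j ∈ l then 1 else mark.getD j 0 := by
  induction l generalizing mark with
  | nil => simp [pvMarkL]
  | cons x l ih =>
    have hj' : j < (mark.set x 1).length := by simpa using hj
    have : pvMarkL mark (x :: l) = pvMarkL (mark.set x 1) l := rfl
    rw [this, ih (mark.set x 1) hj']
    by_cases hjl : j ∈ l
    · simp [hjl]
    · by_cases hx : j = x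
      · subst hx
        have h1 : (mark.set j (1 : Int)).getD j 0 = 1 := by
          rw [List.getD_eq_getElem _ _ (by simpa using hj)]
          exact List.getElem_set_self (by simpa using hj)
        rw [if_neg hjl, h1]
        simp
      · rw [getD_set_ne mark x j 1 (fun h => hx h.symm)]
        simp [hjl, hx]

lemma pvPS_append (st : BSt) (a b : List (Int × Nat)) :
    pvPS st (a ++ b) = pvPS (pvPS st a) b := by
  simp [pvPS, List.foldl_append]

lemma pvPS_mark (l : List (Int × Nat)) (st : BSt) :
    (pvPS st l).2.2.1 = pvMarkL st.2.2.1 (l.map Prod.snd) := by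
  induction l generalizing st with
  | nil => rfl
  | cons x l ih =>
    have h1 : pvPS st (x :: l) = pvPS (pvProc st x.1 x.2) l := rfl
    have h2 : pvMarkL st.2.2.1 ((x :: l).map Prod.snd)
        = pvMarkL (st.2.2.1.set x.2 1) (l.map Prod.snd) := rfl
    rw [h1, h2, ih (pvProc st x.1 x.2)]
    rfl

lemma snd_map_pair (i : Int) (l : List Nat) :
    (l.map (fun j => ((i, j) : Int × Nat))).map Prod.snd = l := by
  simp [List.map_map, Function.comp_def]

-- ---- A's row scan as a pure processing sequence ----
lemma scanAux (G : List (List Int)) (i : Int) :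
    ∀ (l : List Nat), l.Nodup → ∀ (st : BSt) (acc : List Int),
      (l.foldl (fun (a : BSt × List Int) (j : Nat) =>
        if PySem.List.pyGetD (PySem.List.pyGetD G i []) (j : Int) 0 = 1 ∧ a.1.2.2.1.getD j 0 = 0 then
          ((a.1.1.set j i, a.1.2.1.set j a.1.2.2.2, a.1.2.2.1.set j 1, a.1.2.2.2 + 1), a.2 ++ [(j : Int)])
        else a) (st, acc))
      = (pvPS st ((l.filter (fun j => pvEdge G i j && (st.2.2.1.getD j 0 == 0))).map (fun j => (i, j))),
         acc ++ (l.filter (fun j => pvEdge G i j && (st.2.2.1.getD j 0 == 0))).map (fun j => ((j : Nat) : Int))) := by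
  intro l
  induction l with
  | nil => intro _ st acc; simp [pvPS]
  | cons j t ih =>
    intro hnd st acc
    have hj : j ∉ t := (List.nodup_cons.mp hnd).1
    have ht : t.Nodup := (List.nodup_cons.mp hnd).2
    simp only [List.foldl_cons]
    by_cases hc : PySem.List.pyGetD (PySem.List.pyGetD G i []) (j : Int) 0 = 1 ∧ st.2.2.1.getD j 0 = 0
    · rw [if_pos hc]
      have hb : (pvEdge G i j && (st.2.2.1.getD j 0 == 0)) = true := by
        have he : pvEdge G i j = true := by unfold pvEdge; exact beq_iff_eq.mpr hc.1
        rw [Bool.and_eq_true, he]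
        exact ⟨rfl, beq_iff_eq.mpr hc.2⟩
      have hstep : ((st.1.set j i, st.2.1.set j st.2.2.2, st.2.2.1.set j 1, st.2.2.2 + 1), acc ++ [(j : Int)])
          = ((pvProc st i j : BSt), acc ++ [(j : Int)]) := rfl
      rw [hstep, ih ht (pvProc st i j) (acc ++ [(j : Int)])]
      have hfc : t.filter (fun x => pvEdge G i x && ((pvProc st i j).2.2.1.getD x 0 == 0))
          = t.filter (fun x => pvEdge G i x && (st.2.2.1.getD x 0 == 0)) := by
        apply List.filter_congr
        intro x hx
        have hxj : j ≠ x := fun h => hj (h ▸ hx)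
        have : (pvProc st i j).2.2.1.getD x 0 = st.2.2.1.getD x 0 := by
          show (st.2.2.1.set j 1).getD x 0 = st.2.2.1.getD x 0
          exact getD_set_ne st.2.2.1 j x 1 hxj
        rw [this]
      rw [hfc]
      have hft : (j :: t).filter (fun x => pvEdge G i x && (st.2.2.1.getD x 0 == 0))
          = j :: t.filter (fun x => pvEdge G i x && (st.2.2.1.getD x 0 == 0)) := by
        rw [List.filter_cons, if_pos hb]
      rw [hft]
      simp [pvPS, List.map_cons]
    · rw [if_neg hc]
      have hb : (pvEdge G i j && (st.2.2.1.getD j 0 == 0)) = false := by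
        cases hE : pvEdge G i j with
        | false => simp
        | true =>
          have hEe : PySem.List.pyGetD (PySem.List.pyGetD G i []) ((j : Nat) : Int) 0 = 1 := by
            unfold pvEdge at hE; exact beq_iff_eq.mp hE
          have h2 : st.2.2.1.getD j 0 ≠ 0 := fun h => hc ⟨hEe, h⟩
          simp only [Bool.true_and]
          exact beq_eq_false_iff_ne.mpr h2
      have hft : (j :: t).filter (fun x => pvEdge G i x && (st.2.2.1.getD x 0 == 0))
          = t.filter (fun x => pvEdge G i x && (st.2.2.1.getD x 0 == 0)) := by
        rw [List.filter_cons, if_neg (by rw [hb]; exact Bool.false_ne_true)]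
      rw [hft, ih ht st acc]

lemma scanRowA_eq (G : List (List Int)) (n : Nat) (i : Int) (st : BSt) :
    scanRowA G n i (st, []) =
      (pvPS st ((pvRow G n i st.2.2.1).map (fun j => (i, j))),
       (pvRow G n i st.2.2.1).map (fun j => ((j : Nat) : Int))) := by
  unfold scanRowA pvRow
  rw [scanAux G i (List.range n) List.nodup_range st []]
  simp

-- ---- the row-major level as a processing sequence ----
lemma levelRow_eq (G : List (List Int)) (n : Nat) :
    ∀ (f : List Int) (st : BSt),
      levelRow G n f st
        = (pvPS st (pvSeq G n f st.2.2.1),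
           (pvSeq G n f st.2.2.1).map (fun x => ((x.2 : Nat) : Int))) := by
  intro f
  induction f with
  | nil => intro st; simp [levelRow, pvSeq, pvPS]
  | cons i fs ih =>
    intro st
    rw [levelRow_cons, scanRowA_eq]
    set st1 := pvPS st ((pvRow G n i st.2.2.1).map (fun j => (i, j))) with hst1
    have hm1 : st1.2.2.1 = pvMarkL st.2.2.1 (pvRow G n i st.2.2.1) := by
      rw [hst1, pvPS_mark, snd_map_pair]
    rw [ih st1, hm1]
    have hseq : pvSeq G n (i :: fs) st.2.2.1
        = (pvRow G n i st.2.2.1).map (fun j => (i, j))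
          ++ pvSeq G n fs (pvMarkL st.2.2.1 (pvRow G n i st.2.2.1)) := rfl
    rw [hseq, pvPS_append, List.map_append]
    simp [hst1, List.map_map, Function.comp_def]

-- ---- B's bucket construction characterised ----
lemma pvPlace_eq (G : List (List Int)) (j : Nat) :
    ∀ (f : List Int) (p : Nat) (B : List (List Nat)),
      pvPlace G j f p B = (match pvFirst G j f p with
        | some q => B.set q (B.getD q [] ++ [j])
        | none => B) := by
  intro f
  induction f with
  | nil => intro p B; rfl
  | cons i f ih =>
    intro p B
    have hL : pvPlace G j (i :: f) p B
        = if PySem.List.pyGetD (PySem.List.pyGetD G i []) ((j : Nat) : Int) 0 = 1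
          then B.set p (B.getD p [] ++ [j]) else pvPlace G j f (p + 1) B := rfl
    have hF : pvFirst G j (i :: f) p
        = if pvEdge G i j then some p else pvFirst G j f (p + 1) := rfl
    by_cases h : PySem.List.pyGetD (PySem.List.pyGetD G i []) ((j : Nat) : Int) 0 = 1
    · have he : pvEdge G i j = true := by unfold pvEdge; exact beq_iff_eq.mpr h
      rw [hL, if_pos h, hF, he]
      rfl
    · have he : ¬ pvEdge G i j = true := fun hh => h (by unfold pvEdge at hh; exact beq_iff_eq.mp hh)
      rw [hL, if_neg h, hF, if_neg he, ih]

lemma pvFirst_succ (G : List (List Int)) (j : Nat) :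
    ∀ (f : List Int) (p : Nat), pvFirst G j f (p + 1) = (pvFirst G j f p).map (· + 1) := by
  intro f
  induction f with
  | nil => intro p; rfl
  | cons i f ih =>
    intro p
    by_cases h : pvEdge G i j
    · simp [pvFirst, h]
    · simp [pvFirst, h, ih]

lemma getD_map_const_nil (level : List Int) (p : Nat) :
    ((level.map (fun _ => ([] : List Nat))).getD p []) = [] := by
  induction level generalizing p with
  | nil => simp [List.getD]
  | cons i l ih =>
    cases p with
    | zero => rfl
    | succ p => simpa [List.getD] using ih p

lemma self_eq_range_map (B : List (List Nat)) :
    B = (List.range B.length).map (fun p => B.getD p []) := by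
  apply List.ext_getElem
  · simp
  · intro p h1 h2
    simp only [List.getElem_map, List.getElem_range]
    rw [List.getD_eq_getElem _ _ h1]

lemma foldBuckets (g : Nat → Option Nat) :
    ∀ (l : List Nat) (B : List (List Nat)),
      l.foldl (fun B j => (match g j with
          | some q => B.set q (B.getD q [] ++ [j])
          | none => B)) B
        = (List.range B.length).map (fun p => B.getD p [] ++ l.filter (fun j => g j == some p)) := by
  intro l
  induction l with
  | nil =>
    intro B
    simp only [List.foldl_nil, List.filter_nil, List.append_nil]
    exact self_eq_range_map B
  | cons j t ih =>
    intro B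
    simp only [List.foldl_cons]
    cases hg : g j with
    | none =>
      rw [ih B]
      apply List.map_congr_left
      intro p _
      have : (t.filter (fun x => g x == some p)) = ((j :: t).filter (fun x => g x == some p)) := by
        simp [List.filter_cons, hg]
      rw [this]
    | some q =>
      dsimp only
      by_cases hq : q < B.length
      · rw [ih (B.set q (B.getD q [] ++ [j]))]
        rw [List.length_set]
        apply List.map_congr_left
        intro p hp
        have hp' : p < B.length := List.mem_range.mp hp
        by_cases hpq : p = q
        · subst hpq
          have h1 : (B.set p (B.getD p [] ++ [j])).getD p [] = B.getD p [] ++ [j] := by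
            rw [List.getD_eq_getElem _ _ (by simpa using hp')]
            exact List.getElem_set_self (by simpa using hp')
          have h2 : (j :: t).filter (fun x => g x == some p) = j :: t.filter (fun x => g x == some p) := by
            simp [List.filter_cons, hg]
          rw [h1, h2]
          simp
        · have h1 : (B.set q (B.getD q [] ++ [j])).getD p [] = B.getD p [] := by
            simp [List.getD, List.getElem?_set_ne (fun h => hpq h.symm)]
          have h2 : (j :: t).filter (fun x => g x == some p) = t.filter (fun x => g x == some p) := by
            simp [List.filter_cons, hg, hpq]
            intro h; exact absurd h.symm hpq
          rw [h1, h2]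
      · have hB : B.set q (B.getD q [] ++ [j]) = B := List.set_eq_of_length_le (by omega)
        rw [hB, ih B]
        apply List.map_congr_left
        intro p hp
        have hp' : p < B.length := List.mem_range.mp hp
        have hpq : p ≠ q := by omega
        have h2 : (j :: t).filter (fun x => g x == some p) = t.filter (fun x => g x == some p) := by
          simp [List.filter_cons, hg, hpq]
          intro h; exact absurd h.symm hpq
        rw [h2]

lemma pvBuckets_eq (G : List (List Int)) (n : Nat) (seen : List Int) (level : List Int) :
    pvBuckets G n seen level
      = (List.range level.length).map (fun p => (List.range n).filter
          (fun j => (if seen.getD j 0 = 0 then pvFirst G j level 0 else none) == some p)) := by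
  unfold pvBuckets
  have hstep : (fun (B : List (List Nat)) (j : Nat) =>
        if seen.getD j 0 = 0 then pvPlace G j level 0 B else B)
      = (fun B j => (match (if seen.getD j 0 = 0 then pvFirst G j level 0 else none) with
          | some q => B.set q (B.getD q [] ++ [j])
          | none => B)) := by
    funext B j
    by_cases hs : seen.getD j 0 = 0
    · rw [if_pos hs, if_pos hs, pvPlace_eq]
    · rw [if_neg hs, if_neg hs]
  rw [hstep, foldBuckets]
  simp only [List.length_map]
  apply List.map_congr_left
  intro p _
  rw [getD_map_const_nil, List.nil_append]

-- ---- the crux: buckets computed from the initial marks decompose level by level ----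
lemma bspec_cons (G : List (List Int)) (n : Nat) (i : Int) (fs : List Int) (mark : List Int)
    (hm : n ≤ mark.length) :
    (List.range (fs.length + 1)).map (fun p => (List.range n).filter
        (fun j => (if mark.getD j 0 = 0 then pvFirst G j (i :: fs) 0 else none) == some p))
      = pvRow G n i mark ::
        (List.range fs.length).map (fun p => (List.range n).filter
          (fun j => (if (pvMarkL mark (pvRow G n i mark)).getD j 0 = 0
                     then pvFirst G j fs 0 else none) == some p)) := by
  rw [List.range_succ_eq_map, List.map_cons, List.map_map]
  congr 1
  · unfold pvRow
    apply List.filter_congr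
    intro j hj
    by_cases he : pvEdge G i j
    · by_cases h0 : mark[j]?.getD 0 = (0 : Int)
      · simp [pvFirst, he, h0]
      · simp [pvFirst, he, h0]
    · by_cases h0 : mark[j]?.getD 0 = (0 : Int)
      · have : pvFirst G j (i :: fs) 0 = (pvFirst G j fs 0).map (· + 1) := by
          simp [pvFirst, he, pvFirst_succ]
        rw [this] at *
        cases hf : pvFirst G j fs 0 <;> simp [he, h0, this, hf]
      · simp [he, h0]
  · apply List.map_congr_left
    intro p _
    apply List.filter_congr
    intro j hj
    have hjn : j < n := List.mem_range.mp hj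
    have hjm : j < mark.length := by omega
    have hmem : j ∈ pvRow G n i mark ↔ (pvEdge G i j ∧ mark.getD j 0 = 0) := by
      unfold pvRow
      simp [List.mem_filter, List.mem_range, hjn]
    rw [pvMarkL_getD _ _ _ hjm]
    by_cases he : pvEdge G i j
    · by_cases h0 : mark[j]?.getD 0 = (0 : Int)
      · have hin : j ∈ pvRow G n i mark := hmem.mpr ⟨he, h0⟩
        simp [pvFirst, he, h0, hin]
      · have hnin : j ∉ pvRow G n i mark := fun h => h0 (hmem.mp h).2
        simp [h0, hnin]
    · by_cases h0 : mark[j]?.getD 0 = (0 : Int)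
      · have hnin : j ∉ pvRow G n i mark := fun h => he (hmem.mp h).1
        have hfirst : pvFirst G j (i :: fs) 0 = (pvFirst G j fs 0).map (· + 1) := by
          simp [pvFirst, he, pvFirst_succ]
        rw [hfirst]
        cases hf : pvFirst G j fs 0 <;> simp [h0, hnin, hf]
      · have hnin : j ∉ pvRow G n i mark := fun h => h0 (hmem.mp h).2
        simp [h0, hnin]

-- ---- B's flush as a processing sequence ----
lemma flushAux (G : List (List Int)) (i : Int) :
    ∀ (bucket : List Nat) (st : BSt) (acc : List Int),
      bucket.foldl (fun (a : BSt × List Int) (j : Nat) =>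
          ((a.1.1.set j i, a.1.2.1.set j a.1.2.2.2, a.1.2.2.1.set j 1, a.1.2.2.2 + 1),
           a.2 ++ [(j : Int)])) (st, acc)
        = (pvPS st (bucket.map (fun j => (i, j))), acc ++ bucket.map (fun j => ((j : Nat) : Int))) := by
  intro bucket
  induction bucket with
  | nil => intro st acc; simp [pvPS]
  | cons j t ih =>
    intro st acc
    simp only [List.foldl_cons]
    have hstep : ((st.1.set j i, st.2.1.set j st.2.2.2, st.2.2.1.set j 1, st.2.2.2 + 1), acc ++ [(j : Int)])
        = ((pvProc st i j : BSt), acc ++ [(j : Int)]) := rfl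
    rw [hstep, ih (pvProc st i j) (acc ++ [(j : Int)])]
    simp [pvPS, List.map_cons]

lemma flushZip (G : List (List Int)) (n : Nat) :
    ∀ (f : List Int) (st : BSt) (acc : List Int), n ≤ st.2.2.1.length →
      ((f.zip ((List.range f.length).map (fun p => (List.range n).filter
          (fun j => (if st.2.2.1.getD j 0 = 0 then pvFirst G j f 0 else none) == some p)))).foldl
        (fun a ib => ib.2.foldl (fun (a : BSt × List Int) (j : Nat) =>
            ((a.1.1.set j ib.1, a.1.2.1.set j a.1.2.2.2, a.1.2.2.1.set j 1, a.1.2.2.2 + 1),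
             a.2 ++ [(j : Int)])) a) (st, acc))
      = (pvPS st (pvSeq G n f st.2.2.1),
         acc ++ (pvSeq G n f st.2.2.1).map (fun x => ((x.2 : Nat) : Int))) := by
  intro f
  induction f with
  | nil => intro st acc _; simp [pvSeq, pvPS]
  | cons i fs ih =>
    intro st acc hm
    have hlen : (i :: fs).length = fs.length + 1 := rfl
    rw [hlen, bspec_cons G n i fs st.2.2.1 hm, List.zip_cons_cons, List.foldl_cons]
    rw [flushAux G i (pvRow G n i st.2.2.1) st acc]
    set st1 := pvPS st ((pvRow G n i st.2.2.1).map (fun j => (i, j))) with hst1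
    have hm1 : st1.2.2.1 = pvMarkL st.2.2.1 (pvRow G n i st.2.2.1) := by
      rw [hst1, pvPS_mark, snd_map_pair]
    have hm1len : n ≤ st1.2.2.1.length := by
      rw [hm1, pvMarkL_length]; exact hm
    have hzip : fs.zip ((List.range fs.length).map (fun p => (List.range n).filter
          (fun j => (if (pvMarkL st.2.2.1 (pvRow G n i st.2.2.1)).getD j 0 = 0
                     then pvFirst G j fs 0 else none) == some p)))
        = fs.zip ((List.range fs.length).map (fun p => (List.range n).filter
          (fun j => (if st1.2.2.1.getD j 0 = 0 then pvFirst G j fs 0 else none) == some p))) := by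
      rw [hm1]
    rw [hzip, ih st1 (acc ++ (pvRow G n i st.2.2.1).map (fun j => ((j : Nat) : Int))) hm1len]
    have hseq : pvSeq G n (i :: fs) st.2.2.1
        = (pvRow G n i st.2.2.1).map (fun j => (i, j))
          ++ pvSeq G n fs (pvMarkL st.2.2.1 (pvRow G n i st.2.2.1)) := rfl
    rw [hseq, pvPS_append, List.map_append, ← hm1]
    simp [hst1, List.append_assoc]

-- ---- per-level equality and the loops ----
lemma levelStepB_eq (G : List (List Int)) (n : Nat) (f : List Int) (st : BSt)
    (hm : n ≤ st.2.2.1.length) :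
    levelStepB G n f st = levelRow G n f st := by
  unfold levelStepB
  rw [pvBuckets_eq, flushZip G n f st [] hm, List.nil_append, levelRow_eq]

lemma loopBP_eq_loopRow (G : List (List Int)) (n : Nat) :
    ∀ (fuel : Nat) (f : List Int) (st : BSt), st.2.2.1.length = n →
      loopBP G n fuel f st = loopRow G n fuel f st := by
  intro fuel
  induction fuel with
  | zero => intro f st _; cases f <;> rfl
  | succ fuel ih =>
    intro f st hlen
    cases f with
    | nil => rfl
    | cons i fs =>
      have h1 : loopBP G n (fuel + 1) (i :: fs) st
          = loopBP G n fuel (levelStepB G n (i :: fs) st).2 (levelStepB G n (i :: fs) st).1 := rfl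
      have h2 : loopRow G n (fuel + 1) (i :: fs) st
          = loopRow G n fuel (levelRow G n (i :: fs) st).2 (levelRow G n (i :: fs) st).1 := rfl
      rw [h1, h2, levelStepB_eq G n (i :: fs) st (le_of_eq hlen.symm)]
      exact ih _ _ (levelRow_mark' G n (i :: fs) st hlen).1

-- ---- the two ports agree on every input ----
lemma ports_eq (G : List (List Int)) (s : Int) : BFSNodeNode G s = BFSNodeNode_alt G s := by
  have hlen : (PySem.List.pySetD (List.replicate G.length (0 : Int)) s 1).length = G.length := by
    rw [PySem.List.length_pySetD, List.length_replicate]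
  have hz : (PySem.List.pySetD (List.replicate G.length (0 : Int)) s 1).count 0
      ≤ (PySem.List.pySetD (List.replicate G.length (0 : Int)) s 1).length := List.count_le_length
  rw [hlen] at hz
  have key := loop_main G G.length
      ((PySem.List.pySetD (List.replicate G.length (0 : Int)) s 1).count 0)
      (PySem.List.pySetD (List.replicate G.length (-1 : Int)) s s,
       PySem.List.pySetD (List.replicate G.length (0 : Int)) s 1,
       PySem.List.pySetD (List.replicate G.length (0 : Int)) s 1, 2)
      [s] (G.length + 1) (G.length + 1) hlen rfl (by simp; omega) (by omega)
  have keyB := loopBP_eq_loopRow G G.length (G.length + 1) [s]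
      (PySem.List.pySetD (List.replicate G.length (-1 : Int)) s s,
       PySem.List.pySetD (List.replicate G.length (0 : Int)) s 1,
       PySem.List.pySetD (List.replicate G.length (0 : Int)) s 1, 2) hlen
  unfold BFSNodeNode BFSNodeNode_alt
  dsimp only
  rw [key, keyB]

-- ===== VERDICT (by name: the statement is the Claim_ definition above) =====
theorem BFSNodeNode_spec : Claim_equal_BFSNodeNode := by
  intro G s _ _
  unfold Spec_BFSNodeNode
  exact ports_eq G s
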